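-- pv_equiv track=rewrite | github.com/Juliopr/Algoritmos-em-puro-python | algoritmos/Knn_complet.py | obterResposta
-- ===== SOURCE A (Python) =====
-- import operator
--
-- def obterResposta(vizinhos):
--     votos = {}
--     for x in range(len(vizinhos)):
--         resposta = vizinhos[x][-1]
--         if resposta in votos:
--             votos[resposta] += 1
--         else:
--             votos[resposta] = 1
--     votos_organizados = sorted(votos.items(),key=operator.itemgetter(1),reverse=True)
--     return votos_organizados[0][0]
-- ===== SOURCE B (Python) =====
-- def obterResposta(vizinhos):
--     votos = {}
--     for vizinho in vizinhos:
--         resposta = vizinho[-1]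
--         votos[resposta] = votos.get(resposta, 0) + 1
--     melhor_resposta = None
--     melhor_contagem = 0
--     for resposta, contagem in votos.items():
--         if contagem > melhor_contagem:
--             melhor_resposta = resposta
--             melhor_contagem = contagem
--     return melhor_resposta
-- ===== Notes on version B (the rewrite author's own statement) =====
-- stated objective: simpler
-- what changed: Replaces the O(d log d) stable descending sort of the vote dict's items by a single O(d) insertion-order scan keeping the best label under strict '>', which reproduces the stable sort's first-inserted tie-break; counts are built with dict.get instead of a membership branch.
import Mathlib
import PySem

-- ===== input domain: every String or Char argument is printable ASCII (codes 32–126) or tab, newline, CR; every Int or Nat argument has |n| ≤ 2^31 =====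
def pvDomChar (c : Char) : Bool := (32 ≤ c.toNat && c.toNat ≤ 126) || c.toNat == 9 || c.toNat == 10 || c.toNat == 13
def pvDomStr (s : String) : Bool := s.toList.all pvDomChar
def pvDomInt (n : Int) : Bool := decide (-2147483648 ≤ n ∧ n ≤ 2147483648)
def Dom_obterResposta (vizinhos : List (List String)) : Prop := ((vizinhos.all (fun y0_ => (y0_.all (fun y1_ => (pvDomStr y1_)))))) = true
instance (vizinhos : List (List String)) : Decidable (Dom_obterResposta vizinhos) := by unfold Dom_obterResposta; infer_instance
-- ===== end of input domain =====

-- B replaces the stable descending sort of the vote counts by a single strict-'>' argmax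
-- scan in dict insertion order (same result; objective: simpler).

-- ===== PORT A =====
def obterResposta (vizinhos : List (List String)) : String :=
  let votos := (PySem.List.pyRange 0 (PySem.List.len vizinhos)).foldl
    (fun d x =>
      let resposta := (PySem.List.pyGet? (PySem.List.pyGetD vizinhos x []) (-1)).getD ""
      if d.contains resposta then d.insert resposta (d.getD resposta 0 + 1)
      else d.insert resposta 1)
    (PySem.Dict.empty : PySem.Dict String Int)
  let votos_organizados := PySem.List.sorted votos.items (fun p => p.2) true
  ((PySem.List.pyGet? votos_organizados 0).getD ("", 0)).1

-- ===== PORT B =====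
def obterResposta_alt (vizinhos : List (List String)) : String :=
  let votos := vizinhos.foldl
    (fun d vizinho =>
      let resposta := (PySem.List.pyGet? vizinho (-1)).getD ""
      d.insert resposta (d.getD resposta 0 + 1))
    PySem.Dict.empty
  let best := votos.items.foldl
    (fun (b : String × Int) p => if p.2 > b.2 then p else b) ("", 0)
  best.1

-- ===== PRECONDITION & SPEC =====
-- Pre_ excludes exactly the inputs where Python A raises IndexError: an empty neighbour
-- list (votos_organizados[0]) or a neighbour row that is empty (vizinhos[x][-1]).
def Pre_obterResposta (vizinhos : List (List String)) : Prop :=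
  vizinhos ≠ [] ∧ ∀ row ∈ vizinhos, row ≠ []
instance (vizinhos : List (List String)) : Decidable (Pre_obterResposta vizinhos) := by
  unfold Pre_obterResposta; infer_instance
def pvWitness_obterResposta : List (List String) := [["1", "a"], ["2", "b"], ["3", "a"]]

def Spec_obterResposta (vizinhos : List (List String)) (out : String) : Prop := out = obterResposta_alt vizinhos
instance (vizinhos : List (List String)) (out : String) : Decidable (Spec_obterResposta vizinhos out) := by unfold Spec_obterResposta; infer_instance

-- ===== CLAIM (what is proved, stated in full; the proofs are below) =====
def Claim_equal_obterResposta : Prop := ∀ (vizinhos : List (List String)), Dom_obterResposta vizinhos → Pre_obterResposta vizinhos → Spec_obterResposta vizinhos (obterResposta vizinhos)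

-- ===== LEMMAS AND PROOFS =====

-- the last element of a row, as both ports read it
def pvLast (row : List String) : String := (PySem.List.pyGet? row (-1)).getD ""

-- A's counting step (membership branch) is exactly Dict.modify _ 0 (·+1)
theorem pv_stepA_eq (d : PySem.Dict String Int) (r : String) :
    (if d.contains r then d.insert r (d.getD r 0 + 1) else d.insert r 1)
      = d.modify r 0 (· + 1) := by
  by_cases h : d.contains r = true
  · simp [h, PySem.Dict.modify]
  · have hn : d.get? r = none := by
      rw [PySem.Dict.get?_eq_none_iff_contains]
      simpa using h
    simp [h, PySem.Dict.modify, PySem.Dict.getD, hn]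

-- both vote dicts are Counter(map pvLast vizinhos)
theorem pv_votosA_eq (vizinhos : List (List String)) :
    (PySem.List.pyRange 0 (PySem.List.len vizinhos)).foldl
      (fun d x =>
        if d.contains ((PySem.List.pyGet? (PySem.List.pyGetD vizinhos x []) (-1)).getD "") then
          d.insert ((PySem.List.pyGet? (PySem.List.pyGetD vizinhos x []) (-1)).getD "")
            (d.getD ((PySem.List.pyGet? (PySem.List.pyGetD vizinhos x []) (-1)).getD "") 0 + 1)
        else d.insert ((PySem.List.pyGet? (PySem.List.pyGetD vizinhos x []) (-1)).getD "") 1)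
      PySem.Dict.empty
    = PySem.Dict.counter (vizinhos.map pvLast) := by
  have h := PySem.List.foldl_pyRange_pyGetD vizinhos ([] : List String)
    (fun d row =>
      if d.contains (pvLast row) then d.insert (pvLast row) (d.getD (pvLast row) 0 + 1)
      else d.insert (pvLast row) 1)
    (PySem.Dict.empty (κ := String) (ν := Int)) (a := 0) le_rfl
  simp only [Int.toNat_zero, List.drop_zero] at h
  rw [show (fun (d : PySem.Dict String Int) (x : Int) =>
        if d.contains ((PySem.List.pyGet? (PySem.List.pyGetD vizinhos x []) (-1)).getD "") then
          d.insert ((PySem.List.pyGet? (PySem.List.pyGetD vizinhos x []) (-1)).getD "")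
            (d.getD ((PySem.List.pyGet? (PySem.List.pyGetD vizinhos x []) (-1)).getD "") 0 + 1)
        else d.insert ((PySem.List.pyGet? (PySem.List.pyGetD vizinhos x []) (-1)).getD "") 1)
      = (fun d x =>
        if d.contains (pvLast (PySem.List.pyGetD vizinhos x [])) then
          d.insert (pvLast (PySem.List.pyGetD vizinhos x []))
            (d.getD (pvLast (PySem.List.pyGetD vizinhos x [])) 0 + 1)
        else d.insert (pvLast (PySem.List.pyGetD vizinhos x [])) 1) from rfl]
  rw [h, PySem.Dict.counter_eq_foldl, List.foldl_map]
  apply PySem.List.foldl_congr_mem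
  intro acc x _
  exact pv_stepA_eq acc (pvLast x)

theorem pv_votosB_eq (vizinhos : List (List String)) :
    vizinhos.foldl
      (fun d vizinho =>
        d.insert ((PySem.List.pyGet? vizinho (-1)).getD "")
          (d.getD ((PySem.List.pyGet? vizinho (-1)).getD "") 0 + 1))
      PySem.Dict.empty
    = PySem.Dict.counter (vizinhos.map pvLast) := by
  rw [PySem.Dict.counter_eq_foldl, List.foldl_map]
  rfl

-- the strict argmax step both sides reduce to
def pvG (b p : String × Int) : String × Int := if p.2 > b.2 then p else b

-- head of the descending insertion-sort foldl from a nonempty accumulator is the pvG-fold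
theorem pv_head_foldl_insertBy (l : List (String × Int)) :
    ∀ (b : String × Int) (ys : List (String × Int)),
    ∃ t, l.foldl (fun acc x => PySem.List.insertBy (fun a b => decide (b.2 < a.2)) x acc) (b :: ys)
          = (l.foldl pvG b) :: t := by
  induction l with
  | nil => intro b ys; exact ⟨ys, rfl⟩
  | cons x l ih =>
    intro b ys
    by_cases h : b.2 < x.2
    · simpa [PySem.List.insertBy, pvG, h] using ih x (b :: ys)
    · simpa [PySem.List.insertBy, pvG, h] using
        ih b (PySem.List.insertBy (fun a b => decide (b.2 < a.2)) x ys)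

theorem obterResposta_spec' (vizinhos : List (List String))
    (hpre : Pre_obterResposta vizinhos) :
    obterResposta vizinhos = obterResposta_alt vizinhos := by
  obtain ⟨hne, hrows⟩ := hpre
  simp only [obterResposta, obterResposta_alt]
  simp only [pv_votosA_eq, pv_votosB_eq]
  -- the items list of the counter is nonempty and its head has a positive count
  set lasts := vizinhos.map pvLast with hlasts
  have hlne : lasts ≠ [] := by simpa [hlasts] using hne
  obtain ⟨k0, ks, hk⟩ := List.exists_cons_of_ne_nil
    (show PySem.Set.ofList lasts ≠ [] by
      intro h0
      obtain ⟨a, tl, ha⟩ := List.exists_cons_of_ne_nil hlne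
      have : a ∈ PySem.Set.ofList lasts := by
        rw [PySem.Set.mem_ofList]; simp [ha]
      simp [h0] at this)
  have hitems : (PySem.Dict.counter lasts).items
      = (k0, ((lasts.count k0 : Int))) :: ks.map (fun k => (k, (lasts.count k : Int))) := by
    rw [PySem.Dict.items_counter, hk]; rfl
  have hk0mem : k0 ∈ lasts := by
    have : k0 ∈ PySem.Set.ofList lasts := by rw [hk]; exact List.mem_cons_self
    rwa [PySem.Set.mem_ofList] at this
  have hpos : (0 : Int) < (lasts.count k0 : Int) := by
    exact_mod_cast List.count_pos_iff.mpr hk0mem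
  rw [hitems]
  -- A side: stable descending sort as an insertBy fold, then its head
  rw [PySem.List.sorted_rev_eq_foldl_insertBy]
  simp only [List.foldl_cons]
  obtain ⟨t, ht⟩ := pv_head_foldl_insertBy (ks.map (fun k => (k, (lasts.count k : Int))))
    (k0, (lasts.count k0 : Int)) []
  rw [show PySem.List.insertBy (fun a b => decide (b.2 < a.2))
        (k0, ((lasts.count k0 : Int))) ([] : List (String × Int))
      = [(k0, ((lasts.count k0 : Int)))] from rfl] at *
  rw [ht]
  -- B side: first fold step absorbs the zero accumulator
  have hB : pvG ("", 0) (k0, (lasts.count k0 : Int)) = (k0, (lasts.count k0 : Int)) := by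
    unfold pvG; exact if_pos hpos
  show ((PySem.List.pyGet? ((List.foldl pvG (k0, ((lasts.count k0 : Int)))
      (ks.map (fun k => (k, (lasts.count k : Int))))) :: t) 0).getD ("", 0)).1
    = (List.foldl pvG ("", 0)
        ((k0, ((lasts.count k0 : Int))) :: ks.map (fun k => (k, (lasts.count k : Int))))).1
  rw [List.foldl_cons, hB]
  simp [PySem.List.pyGet?, PySem.List.pyIdx?]

-- ===== VERDICT (by name: the statement is the Claim_ definition above) =====
theorem obterResposta_spec : Claim_equal_obterResposta := by
  intro vizinhos _ hpre
  unfold Spec_obterResposta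
  exact obterResposta_spec' vizinhos hpre
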